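-- pv_equiv track=rewrite | github.com/PaperGlit/IS_Lab_3 | get_e.py | get_e
-- ===== SOURCE A (Python) =====
-- import math
--
-- def get_e(p, phi):
--     for e in reversed(range(p)):
--         for i in range(2, (e // 2) + 1):
--             if (e % i) == 0:
--                 break
--         else:
--             if math.gcd(e, phi) == 1:
--                 return int(e)
--     else:
--         raise ValueError("No valid value was found for e.")
-- ===== SOURCE B (Python) =====
-- import math
--
-- def get_e(p, phi):
--     # Count down from p-1; primality by trial division only up to sqrt(e).
--     e = p - 1
--     while e >= 0:
--         if _is_prime_or_unit(e) and math.gcd(e, phi) == 1: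
--             return e
--         e -= 1
--     raise ValueError("No valid value was found for e.")
--
-- def _is_prime_or_unit(e):
--     # True for 0 and 1 (no divisor tested), and for primes.
--     i = 2
--     while i * i <= e:
--         if e % i == 0:
--             return False
--         i += 1
--     return True
-- ===== Notes on version B (the rewrite author's own statement) =====
-- stated objective: faster
-- what changed: Counts down with a trial-division primality test bounded by sqrt(e) instead of scanning all candidate divisors up to e//2.
import Mathlib
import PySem

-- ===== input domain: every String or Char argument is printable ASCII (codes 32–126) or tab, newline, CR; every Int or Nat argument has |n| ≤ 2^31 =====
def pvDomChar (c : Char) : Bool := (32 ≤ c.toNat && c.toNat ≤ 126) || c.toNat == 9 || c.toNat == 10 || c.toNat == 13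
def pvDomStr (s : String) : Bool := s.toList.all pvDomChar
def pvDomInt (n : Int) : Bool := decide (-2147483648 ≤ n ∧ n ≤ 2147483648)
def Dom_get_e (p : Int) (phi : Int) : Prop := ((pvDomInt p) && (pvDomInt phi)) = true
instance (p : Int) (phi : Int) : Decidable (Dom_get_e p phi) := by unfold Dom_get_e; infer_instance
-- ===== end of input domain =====

-- B changes the primality scan: divisors are tried only up to sqrt(e) instead of e//2 (objective: faster).

-- ===== PORT A =====
-- for e in reversed(range(p)): inner for-else scans divisors 2..e//2; -1 stands for the ValueError (excluded by Pre_)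
def get_e_loopA (phi : Int) : List Int → Int
  | [] => -1
  | e :: rest =>
    if (PySem.List.pyRange 2 (PySem.Int.floordiv e 2 + 1) 1).any
        (fun i => PySem.Int.mod e i == 0) then
      get_e_loopA phi rest
    else if Int.gcd e phi == 1 then e
    else get_e_loopA phi rest

def get_e (p : Int) (phi : Int) : Int :=
  get_e_loopA phi ((PySem.List.pyRange 0 p 1).reverse)

-- ===== PORT B =====
-- while i * i <= e: trial division up to sqrt(e); True for 0 and 1 as well
def isPrimeOrUnit (e : Int) (i : Int) : Bool :=
  if h : i * i ≤ e then
    if PySem.Int.mod e i == 0 then false else isPrimeOrUnit e (i + 1)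
  else true
  termination_by (e + 1 - i).toNat
  decreasing_by
    have hie : i ≤ e := by by_cases h0 : i ≤ 0 <;> [nlinarith; nlinarith]
    omega

-- while e >= 0 counting down; -1 stands for the ValueError (excluded by Pre_)
def get_e_loopB (phi : Int) (e : Int) : Int :=
  if 0 ≤ e then
    if isPrimeOrUnit e 2 && (Int.gcd e phi == 1) then e
    else get_e_loopB phi (e - 1)
  else -1
  termination_by (e + 1).toNat
  decreasing_by omega

def get_e_alt (p : Int) (phi : Int) : Int :=
  get_e_loopB phi (p - 1)

-- ===== PRECONDITION & SPEC =====
-- Pre_ excludes exactly the inputs where A raises ValueError (p ≤ 0, or p = 1 with |phi| ≠ 1); B raises the same error there.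
def Pre_get_e (p : Int) (phi : Int) : Prop := 2 ≤ p ∨ (p = 1 ∧ (phi = 1 ∨ phi = -1))
instance (p : Int) (phi : Int) : Decidable (Pre_get_e p phi) := by unfold Pre_get_e; infer_instance
def pvWitness_get_e : Int × Int := (7, 4)

def Spec_get_e (p : Int) (phi : Int) (out : Int) : Prop := out = get_e_alt p phi
instance (p : Int) (phi : Int) (out : Int) : Decidable (Spec_get_e p phi out) := by unfold Spec_get_e; infer_instance

-- ===== CLAIM (what is proved, stated in full; the proofs are below) =====
def Claim_equal_get_e : Prop := ∀ (p : Int) (phi : Int), Dom_get_e p phi → Pre_get_e p phi → Spec_get_e p phi (get_e p phi)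

-- ===== LEMMAS AND PROOFS =====

-- B's scan as a predicate: no divisor i with j ≤ i and i*i ≤ e
theorem isPrimeOrUnit_iff (e j : Int) :
    0 ≤ j → (isPrimeOrUnit e j = true ↔ ∀ i : Int, j ≤ i → i * i ≤ e → ¬ (i ∣ e)) := by
  fun_induction isPrimeOrUnit e j with
  | case1 j hle hdvd =>
    intro hj
    simp only [beq_iff_eq, PySem.Int.mod_eq_zero_iff_dvd] at hdvd
    simp only [Bool.false_eq_true, false_iff, not_forall]
    exact ⟨j, le_refl _, hle, by simpa using hdvd⟩
  | case2 j hle hnd ih =>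
    intro hj
    rw [ih (by omega)]
    simp only [beq_iff_eq, PySem.Int.mod_eq_zero_iff_dvd] at hnd
    constructor
    · intro H i hji hii
      rcases eq_or_lt_of_le hji with rfl | hlt
      · exact hnd
      · exact H i (by omega) hii
    · intro H i hji hii
      exact H i (by omega) hii
  | case3 j hgt =>
    intro hj
    simp only [true_iff]
    intro i hji hii hd
    nlinarith

-- A's inner scan (divisors up to e//2) finds one iff B's sqrt-bounded scan does
theorem pass_iff (e : Int) (he : 0 ≤ e) :
    ((PySem.List.pyRange 2 (PySem.Int.floordiv e 2 + 1) 1).any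
        (fun i => PySem.Int.mod e i == 0)) = !(isPrimeOrUnit e 2) := by
  have key := isPrimeOrUnit_iff e 2 (by omega)
  cases hP : isPrimeOrUnit e 2 with
  | true =>
    simp only [Bool.not_true]
    rw [key] at hP
    simp only [List.any_eq_false]
    intro i hi
    rw [PySem.List.mem_pyRange_one] at hi
    obtain ⟨h2i, hiu⟩ := hi
    have hie2 : i * 2 ≤ e := by
      rw [← PySem.Int.le_floordiv_iff_mul_le (by omega : (0:Int) < 2)]; omega
    simp only [beq_iff_eq, PySem.Int.mod_eq_zero_iff_dvd]
    intro hdvd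
    by_cases hii : i * i ≤ e
    · exact hP i h2i hii hdvd
    · -- otherwise the cofactor k = e / i is a divisor with k * k ≤ e
      set k := e / i with hk
      have hki : k * i = e := Int.ediv_mul_cancel hdvd
      have hipos : (0:Int) < i := by omega
      have hklt : k < i := by nlinarith
      have hk2 : 2 ≤ k := by nlinarith
      have hkk : k * k ≤ e := by nlinarith
      exact hP k hk2 hkk ⟨i, hki.symm⟩
  | false =>
    simp only [Bool.not_false]
    have hP' : ¬ ∀ i : Int, 2 ≤ i → i * i ≤ e → ¬ (i ∣ e) := by
      intro H
      rw [← key] at H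
      simp [hP] at H
    push Not at hP'
    obtain ⟨i, h2i, hii, hdvd⟩ := hP'
    rw [List.any_eq_true]
    refine ⟨i, ?_, by simpa [PySem.Int.mod_eq_zero_iff_dvd] using hdvd⟩
    rw [PySem.List.mem_pyRange_one]
    have : i * 2 ≤ e := by nlinarith
    have : i ≤ PySem.Int.floordiv e 2 := by
      rw [PySem.Int.le_floordiv_iff_mul_le (by omega : (0:Int) < 2)]; omega
    omega

-- both loops walk e, e-1, … and agree step by step
theorem loop_eq (phi e : Int) :
    get_e_loopA phi (PySem.List.pyRange e (-1) (-1)) = get_e_loopB phi e := by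
  by_cases he : 0 ≤ e
  · rw [PySem.List.pyRange_neg_one_cons (by omega : (-1:Int) < e)]
    rw [get_e_loopB, if_pos he]
    simp only [get_e_loopA, pass_iff e he]
    cases hP : isPrimeOrUnit e 2 with
    | true =>
      simp only [Bool.not_true, Bool.true_and, if_neg (by simp : ¬ (false = true))]
      by_cases hg : Int.gcd e phi = 1
      · simp [hg]
      · simp only [beq_iff_eq, if_neg hg]
        exact loop_eq phi (e - 1)
    | false =>
      simp only [Bool.not_false, Bool.false_and, Bool.false_eq_true, if_neg (by simp : ¬ False)]
      exact loop_eq phi (e - 1)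
  · rw [PySem.List.pyRange_neg_one_eq_nil (by omega : e ≤ -1)]
    rw [get_e_loopB, if_neg he]
    rfl
  termination_by (e + 1).toNat
  decreasing_by all_goals omega

-- ===== VERDICT (by name: the statement is the Claim_ definition above) =====
theorem get_e_spec : Claim_equal_get_e := by
  intro p phi _ _
  unfold Spec_get_e get_e get_e_alt
  have h := PySem.List.pyRange_neg_one_eq_reverse (p - 1) (-1)
  have h2 : p - 1 + 1 = p := by ring
  rw [h2] at h
  norm_num at h
  rw [← h]
  exact loop_eq phi (p - 1)
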